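-- pv_equiv track=rewrite | github.com/ClaudiuBogdan/hack-for-facts-eb-server | scripts/validate_pdf_totals.py | is_immediate_child
-- ===== SOURCE A (Python) =====
-- def split_key(key: str) -> tuple[str, str, str]:
--     parts = key.split(".") if key else []
--     padded = [*parts[:3], *["00"] * (3 - len(parts))]
--     return (padded[0], padded[1], padded[2])
--
-- def hierarchy_level(key: str) -> int:
--     parts = split_key(key)
--     if parts[2] != "00":
--         return 3
--     if parts[1] != "00":
--         return 2
--     if parts[0] != "00":
--         return 1
--     return 0
--
-- def is_immediate_child(parent_key: str, child_key: str) -> bool: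
--     parent_parts = split_key(parent_key)
--     child_parts = split_key(child_key)
--     parent_level = hierarchy_level(parent_key)
--     child_level = hierarchy_level(child_key)
--
--     if parent_level == 0 or child_level != parent_level + 1:
--         return False
--
--     if parent_parts[:parent_level] != child_parts[:parent_level]:
--         return False
--
--     if child_parts[parent_level] == "00":
--         return False
--
--     for index in range(child_level, 3):
--         if child_parts[index] != "00":
--             return False
--
--     return True
-- ===== SOURCE B (Python) =====
-- def is_immediate_child(parent_key: str, child_key: str) -> bool:
--     def pad(key):
--         parts = key.split(".") if key else []
--         return (parts + ["00"] * 3)[:3]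
--     c = pad(child_key)
--     # depth of the child's deepest significant part
--     L = max((i + 1 for i in range(3) if c[i] != "00"), default=0)
--     if L < 2 or c[L - 2] == "00":
--         return False
--     # reconstruct the only key that could be the immediate parent, and compare
--     expected_parent = c[:L - 1] + ["00"] * (4 - L)
--     return pad(parent_key) == expected_parent
-- ===== Notes on version B (the rewrite author's own statement) =====
-- stated objective: alternative
-- what changed: B inverts the question: instead of computing both keys' hierarchy levels and comparing level arithmetic and prefixes like A, it reconstructs from the child key the unique padded key its immediate parent must have (zeroing the child's deepest significant part, after checking the part just above it is significant) and compares the parent key against that reconstruction.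
import Mathlib
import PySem

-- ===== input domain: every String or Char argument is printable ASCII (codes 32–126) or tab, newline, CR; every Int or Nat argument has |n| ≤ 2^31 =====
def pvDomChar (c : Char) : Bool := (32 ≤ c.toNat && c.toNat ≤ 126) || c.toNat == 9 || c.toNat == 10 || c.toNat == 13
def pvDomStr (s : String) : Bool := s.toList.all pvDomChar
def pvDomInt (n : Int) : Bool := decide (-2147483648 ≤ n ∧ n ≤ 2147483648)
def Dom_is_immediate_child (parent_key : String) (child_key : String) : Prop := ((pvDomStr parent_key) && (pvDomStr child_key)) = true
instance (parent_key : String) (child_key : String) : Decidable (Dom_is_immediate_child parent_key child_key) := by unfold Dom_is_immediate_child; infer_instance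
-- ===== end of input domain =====

-- B reconstructs from the child key the unique padded key its immediate parent must have and
-- compares the parent key against it, instead of A's level arithmetic and prefix checks
-- (objective: alternative decomposition, same cost).

-- ===== PORT A =====
-- split_key: key.split(".") if key else [], sliced to 3 and padded with "00"; returned as a triple.
-- key.split(".") → (PySem.Str.split? key ".").getD []: the separator "." is nonempty, so split? is never none.
-- padded always has length 3, so the `.getD ""` defaults on padded[0..2] are never taken.
def split_key (key : String) : String × String × String :=
  let parts := if key ≠ "" then (PySem.Str.split? key ".").getD [] else []
  let padded := PySem.List.slice parts (some 0) (some 3) ++ List.replicate (3 - parts.length) "00"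
  (((PySem.List.pyGet? padded 0).getD ""), ((PySem.List.pyGet? padded 1).getD ""), ((PySem.List.pyGet? padded 2).getD ""))

def hierarchy_level (key : String) : Int :=
  let parts := split_key key
  if parts.2.2 ≠ "00" then 3
  else if parts.2.1 ≠ "00" then 2
  else if parts.1 ≠ "00" then 1
  else 0

def is_immediate_child (parent_key : String) (child_key : String) : Bool :=
  let pp := split_key parent_key
  let cp := split_key child_key
  let ppl : List String := [pp.1, pp.2.1, pp.2.2]
  let cpl : List String := [cp.1, cp.2.1, cp.2.2]
  let parent_level := hierarchy_level parent_key
  let child_level := hierarchy_level child_key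
  if parent_level = 0 ∨ child_level ≠ parent_level + 1 then false
  else if PySem.List.slice ppl (some 0) (some parent_level) ≠ PySem.List.slice cpl (some 0) (some parent_level) then false
  -- child_parts[parent_level]: always in range here (1 ≤ parent_level ≤ 2), so the `.getD ""` default is never taken
  else if (PySem.List.pyGet? cpl parent_level).getD "" = "00" then false
  -- for index in range(child_level, 3): if child_parts[index] != "00": return False
  else if (PySem.List.pyRange child_level 3 1).any
            (fun index => (PySem.List.pyGet? cpl index).getD "" ≠ "00") then false
  else true

-- ===== PORT B =====
-- pad(key) = (key.split(".") if key else [] + ["00"]*3)[:3]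
def padKey (key : String) : List String :=
  let parts := if key ≠ "" then (PySem.Str.split? key ".").getD [] else []
  PySem.List.slice (parts ++ List.replicate 3 "00") (some 0) (some 3)

def is_immediate_child_alt (parent_key : String) (child_key : String) : Bool :=
  let c := padKey child_key
  -- L = max((i+1 for i in range(3) if c[i] != "00"), default=0)
  let L : Int := (PySem.List.pyRange 0 3 1).foldl
      (fun acc i => if (PySem.List.pyGet? c i).getD "" ≠ "00" then max acc (i + 1) else acc) 0
  if L < 2 ∨ (PySem.List.pyGet? c (L - 2)).getD "" = "00" then false
  else
    -- expected_parent = c[:L-1] + ["00"] * (4 - L)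
    decide (padKey parent_key
      = PySem.List.slice c (some 0) (some (L - 1)) ++ List.replicate (4 - L).toNat "00")

-- ===== PRECONDITION & SPEC =====
def Spec_is_immediate_child (parent_key : String) (child_key : String) (out : Bool) : Prop := out = is_immediate_child_alt parent_key child_key
instance (parent_key : String) (child_key : String) (out : Bool) : Decidable (Spec_is_immediate_child parent_key child_key out) := by unfold Spec_is_immediate_child; infer_instance

-- ===== CLAIM (what is proved, stated in full; the proofs are below) =====
def Claim_equal_is_immediate_child : Prop := ∀ (parent_key : String) (child_key : String), Dom_is_immediate_child parent_key child_key → Spec_is_immediate_child parent_key child_key (is_immediate_child parent_key child_key)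

-- ===== LEMMAS AND PROOFS =====

-- the padded length-3 list both ports build, as a function of the raw split
def pvPad (ps : List String) : List String :=
  ps.take 3 ++ List.replicate (3 - ps.length) "00"

lemma pvPad_shape (ps : List String) : ∃ a b c, pvPad ps = [a, b, c] := by
  match ps with
  | [] => exact ⟨"00", "00", "00", rfl⟩
  | [a] => exact ⟨a, "00", "00", rfl⟩
  | [a, b] => exact ⟨a, b, "00", rfl⟩
  | a :: b :: c :: rest => exact ⟨a, b, c, by simp [pvPad]⟩

lemma slice03 (ps : List String) : PySem.List.slice ps (some 0) (some 3) = ps.take 3 := by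
  simp [PySem.List.slice]

lemma split_key_pad (key : String) (a b c : String)
    (h : pvPad (if key ≠ "" then (PySem.Str.split? key ".").getD [] else []) = [a, b, c]) :
    split_key key = (a, b, c) := by
  unfold pvPad at h
  simp only [split_key, slice03]
  rw [h]
  simp

lemma padKey_eq (key : String) :
    padKey key = pvPad (if key ≠ "" then (PySem.Str.split? key ".").getD [] else []) := by
  unfold padKey
  generalize (if key ≠ "" then (PySem.Str.split? key ".").getD [] else []) = ps
  rw [slice03]
  match ps with
  | [] => rfl
  | [a] => rfl
  | [a, b] => rfl
  | a :: b :: c :: rest => simp [pvPad]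

-- evaluation lemmas on literal length-3 lists and literal ranges
lemma get0 (x y z : String) : (PySem.List.pyGet? [x, y, z] 0).getD "" = x := rfl
lemma get1 (x y z : String) : (PySem.List.pyGet? [x, y, z] 1).getD "" = y := rfl
lemma get2 (x y z : String) : (PySem.List.pyGet? [x, y, z] 2).getD "" = z := rfl
lemma sn1 (x y z : String) : PySem.List.slice [x, y, z] none (some 1) = [x] := rfl
lemma sn2 (x y z : String) : PySem.List.slice [x, y, z] none (some 2) = [x, y] := rfl
lemma rg03 : PySem.List.pyRange 0 3 1 = [0, 1, 2] := rfl
lemma rg23 : PySem.List.pyRange 2 3 1 = [2] := rfl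

set_option maxHeartbeats 2000000 in
lemma core (a b c a' b' c' : String) :
    (let ppl : List String := [a, b, c]
     let cpl : List String := [a', b', c']
     let parent_level : Int := if c ≠ "00" then 3 else if b ≠ "00" then 2 else if a ≠ "00" then 1 else 0
     let child_level : Int := if c' ≠ "00" then 3 else if b' ≠ "00" then 2 else if a' ≠ "00" then 1 else 0
     if parent_level = 0 ∨ child_level ≠ parent_level + 1 then false
     else if PySem.List.slice ppl (some 0) (some parent_level) ≠ PySem.List.slice cpl (some 0) (some parent_level) then false
     else if (PySem.List.pyGet? cpl parent_level).getD "" = "00" then false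
     else if (PySem.List.pyRange child_level 3 1).any
               (fun index => (PySem.List.pyGet? cpl index).getD "" ≠ "00") then false
     else true)
    =
    (let cl : List String := [a', b', c']
     let L : Int := (PySem.List.pyRange 0 3 1).foldl
        (fun acc i => if (PySem.List.pyGet? cl i).getD "" ≠ "00" then max acc (i + 1) else acc) 0
     if L < 2 ∨ (PySem.List.pyGet? cl (L - 2)).getD "" = "00" then false
     else decide ([a, b, c]
        = PySem.List.slice cl (some 0) (some (L - 1)) ++ List.replicate (4 - L).toNat "00")) := by
  simp only [rg03, List.foldl, get0, get1, get2]
  by_cases h1 : a = "00" <;> by_cases h2 : b = "00" <;> by_cases h3 : c = "00" <;>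
    by_cases h4 : a' = "00" <;> by_cases h5 : b' = "00" <;> by_cases h6 : c' = "00" <;>
    (try subst_vars) <;>
    simp_all [sn1, sn2, rg23, eq_comm]

-- ===== VERDICT (by name: the statement is the Claim_ definition above) =====
theorem is_immediate_child_spec : Claim_equal_is_immediate_child := by
  intro pk ck _
  unfold Spec_is_immediate_child
  obtain ⟨a, b, c, hp⟩ := pvPad_shape (if pk ≠ "" then (PySem.Str.split? pk ".").getD [] else [])
  obtain ⟨a', b', c', hc⟩ := pvPad_shape (if ck ≠ "" then (PySem.Str.split? ck ".").getD [] else [])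
  have hpk : padKey pk = [a, b, c] := by rw [padKey_eq, hp]
  have hck : padKey ck = [a', b', c'] := by rw [padKey_eq, hc]
  unfold is_immediate_child hierarchy_level is_immediate_child_alt
  rw [split_key_pad pk a b c hp, split_key_pad ck a' b' c' hc, hpk, hck]
  exact core a b c a' b' c'
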